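-- pv_equiv track=rewrite | github.com/uoahnsuul/Problem_Solving | programmers/월간코드챌린지시즌3_n^2 배열 자르기.py | solution
-- ===== SOURCE A (Python) =====
-- def solution(n, left, right):
--     answer = [0] * (right-left + 1)
--     i = left // n
--     j = left % n
--     k=0
--     while(k<len(answer)):
--         while(j<=i):
--             answer[k] = i+1
--             j += 1
--             k += 1
--             if k == len(answer):
--                 break
--             if j== n:
--                 i += 1
--                 j = 0
--         while(i<j and j<n):
--             answer[k] = j+1
--             j += 1
--             k += 1
--             if k == len(answer):
--                 break
--             if j== n:
--                 i += 1
--                 j = 0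
--
--     return answer
-- ===== SOURCE B (Python) =====
-- def solution(n, left, right):
--     return [max(p // n, p % n) + 1 for p in range(left, right + 1)]
-- ===== Notes on version B (the rewrite author's own statement) =====
-- stated objective: simpler
-- what changed: Replaces A's stateful i/j carry machine (outer while with two branch-heavy inner whiles and manual break/reset logic) by a stateless one-line comprehension computing max(p//n, p%n)+1 directly for each flat index p.
-- crash fix: When left <= right and right lies on the main diagonal but not in the last column (right % n == right // n, right % n + 1 < n; region stated for slices shorter than 2^23 so B's list is feasibly materialised), A raises IndexError from the break falling through into the second while, and B returns the intended list; also for n == 0 with right < left A raises ZeroDivisionError while B returns []. — e.g. on solution(2, 0, 0): A raises IndexError, B returns [1]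
import Mathlib
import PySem

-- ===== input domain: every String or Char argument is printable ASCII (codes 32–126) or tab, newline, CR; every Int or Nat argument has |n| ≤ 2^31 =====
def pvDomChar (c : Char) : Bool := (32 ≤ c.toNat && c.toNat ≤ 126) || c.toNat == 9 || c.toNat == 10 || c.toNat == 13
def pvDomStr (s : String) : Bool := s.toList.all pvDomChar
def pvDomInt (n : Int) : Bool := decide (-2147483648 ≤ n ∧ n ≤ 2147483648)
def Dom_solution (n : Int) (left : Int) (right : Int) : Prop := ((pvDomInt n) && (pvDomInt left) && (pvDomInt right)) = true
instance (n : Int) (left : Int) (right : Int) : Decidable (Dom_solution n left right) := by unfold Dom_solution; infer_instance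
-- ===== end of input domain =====

-- B replaces A's stateful i/j carry machine by a stateless per-index formula; equal on Pre_, where A returns at all.

-- ===== PORT A =====
-- A's first inner `while j <= i:` loop, fuel-bounded (each iteration writes one cell and increments k,
-- and the loop breaks at k = len, so `len+1` fuel covers every run on which Python returns; the
-- out-of-range write Python would raise IndexError on is a `List.set` no-op here — such runs are
-- excluded by Pre_solution). Returns the updated (i, j, k, answer).
def pvWhile1 (n : Int) : Int → Int → Nat → List Int → Nat → Int × Int × Nat × List Int
  | i, j, k, ans, 0 => (i, j, k, ans)
  | i, j, k, ans, f+1 =>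
    if j ≤ i then            -- answer[k] = i+1; j += 1; k += 1; break at k == len(answer); carry at j == n
      if k + 1 = (ans.set k (i + 1)).length then (i, j + 1, k + 1, ans.set k (i + 1))
      else if j + 1 = n then pvWhile1 n (i + 1) 0 (k + 1) (ans.set k (i + 1)) f
      else pvWhile1 n i (j + 1) (k + 1) (ans.set k (i + 1)) f
    else (i, j, k, ans)

-- A's second inner `while i < j and j < n:` loop, same shape with value j+1.
def pvWhile2 (n : Int) : Int → Int → Nat → List Int → Nat → Int × Int × Nat × List Int
  | i, j, k, ans, 0 => (i, j, k, ans)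
  | i, j, k, ans, f+1 =>
    if i < j ∧ j < n then    -- answer[k] = j+1; same j/k/break/carry steps as above
      if k + 1 = (ans.set k (j + 1)).length then (i, j + 1, k + 1, ans.set k (j + 1))
      else if j + 1 = n then pvWhile2 n (i + 1) 0 (k + 1) (ans.set k (j + 1)) f
      else pvWhile2 n i (j + 1) (k + 1) (ans.set k (j + 1)) f
    else (i, j, k, ans)

-- A's outer `while k < len(answer):` loop; each iteration runs the two inner whiles in sequence.
-- On every run where Python returns, each outer iteration increases k, so `len+1` fuel suffices.
def pvOuter (n : Int) : Int → Int → Nat → List Int → Nat → List Int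
  | _, _, _, ans, 0 => ans
  | i, j, k, ans, f+1 =>
    if k < ans.length then
      match pvWhile1 n i j k ans (ans.length + 1) with
      | (i1, j1, k1, ans1) =>
        match pvWhile2 n i1 j1 k1 ans1 (ans1.length + 1) with
        | (i2, j2, k2, ans2) => pvOuter n i2 j2 k2 ans2 f
    else ans

def solution (n : Int) (left : Int) (right : Int) : List Int :=
  let answer : List Int := List.replicate (right - left + 1).toNat 0   -- answer = [0] * (right-left+1)
  pvOuter n (PySem.Int.floordiv left n) (PySem.Int.mod left n) 0 answer (answer.length + 1)

-- ===== PORT B =====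
def solution_alt (n : Int) (left : Int) (right : Int) : List Int :=
  (PySem.List.pyRange left (right + 1) 1).map
    (fun p => max (PySem.Int.floordiv p n) (PySem.Int.mod p n) + 1)

-- ===== PRECONDITION & SPEC =====
-- Pre_ restricts to the puzzle's natural domain n ≥ 1 (for n = 0 Python A raises ZeroDivisionError;
-- for n < 0 it usually loops forever and any returned values are accidents of the carry machine,
-- outside the n×n-array problem A implements), and excludes the inputs on which A raises IndexError:
-- those where the last index `right` sits on the main diagonal but not in the last column, so the
-- break out of the first inner while falls through into the second while past the end of `answer`;
-- it additionally admits every empty slice (right < left, n ≠ 0), on which both programs return [].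
def Pre_solution (n : Int) (left : Int) (right : Int) : Prop :=
  (1 ≤ n ∧ ¬(left ≤ right ∧ PySem.Int.mod right n = PySem.Int.floordiv right n ∧
             PySem.Int.mod right n + 1 < n))
  ∨ (¬ n = 0 ∧ right < left)
instance (n : Int) (left : Int) (right : Int) : Decidable (Pre_solution n left right) := by
  unfold Pre_solution; infer_instance

def pvWitness_solution : Int × Int × Int := (3, 2, 7)

-- When left ≤ right and right % n == right // n with right % n + 1 < n (n ≥ 1), A's break from the
-- first inner while falls into the second while and raises IndexError; B returns the intended list
-- ending in right // n + 1 (region stated for slices shorter than 2^23, where B's list is feasibly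
-- materialised); also, for n = 0 with an empty slice (right < left), A raises ZeroDivisionError on
-- `left // n` while B returns [].
def Raises_solution (n : Int) (left : Int) (right : Int) : Prop :=
  (1 ≤ n ∧ left ≤ right ∧ right - left < 8388608 ∧
   PySem.Int.mod right n = PySem.Int.floordiv right n ∧ PySem.Int.mod right n + 1 < n)
  ∨ (n = 0 ∧ right < left)
instance (n : Int) (left : Int) (right : Int) : Decidable (Raises_solution n left right) := by
  unfold Raises_solution; infer_instance
def pvRaiseWitness_solution : Int × Int × Int := (2, 0, 0)
def pvRaiseWitnessOut_solution : List Int := [1]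

def Spec_solution (n : Int) (left : Int) (right : Int) (out : List Int) : Prop := out = solution_alt n left right
instance (n : Int) (left : Int) (right : Int) (out : List Int) : Decidable (Spec_solution n left right out) := by unfold Spec_solution; infer_instance

-- ===== CLAIM (what is proved, stated in full; the proofs are below) =====
def Claim_equal_solution : Prop := ∀ (n : Int) (left : Int) (right : Int), Dom_solution n left right → Pre_solution n left right → Spec_solution n left right (solution n left right)

def Claim_raises_solution : Prop :=
  (∀ (n : Int) (left : Int) (right : Int), Dom_solution n left right → Raises_solution n left right → ¬ Pre_solution n left right) ∧
  (Dom_solution (pvRaiseWitness_solution.1) (pvRaiseWitness_solution.2.1) (pvRaiseWitness_solution.2.2) ∧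
   Raises_solution (pvRaiseWitness_solution.1) (pvRaiseWitness_solution.2.1) (pvRaiseWitness_solution.2.2) ∧
   solution_alt (pvRaiseWitness_solution.1) (pvRaiseWitness_solution.2.1) (pvRaiseWitness_solution.2.2) = pvRaiseWitnessOut_solution)

-- ===== LEMMAS AND PROOFS =====

-- B's per-cell value at flat index p.
def pvF (n p : Int) : Int := max (PySem.Int.floordiv p n) (PySem.Int.mod p n) + 1

-- The answer array after the first k cells have been filled.
def pvGood (n l : Int) (len k : Nat) : List Int :=
  (List.range k).map (fun t : Nat => pvF n (l + (t : Int))) ++ List.replicate (len - k) 0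

theorem pvGood_length (n l : Int) (len k : Nat) (hk : k ≤ len) :
    (pvGood n l len k).length = len := by
  simp [pvGood]; omega

theorem pvGood_set (n l : Int) (len k : Nat) (hk : k < len) :
    (pvGood n l len k).set k (pvF n (l + k)) = pvGood n l len (k + 1) := by
  unfold pvGood
  rw [List.set_append_right _ _ (by simp)]
  have h1 : len - k = (len - (k+1)) + 1 := by omega
  simp [h1, List.range_succ, List.replicate_succ]

-- Division-algorithm step: how (p+1)//n, (p+1)%n relate to p//n, p%n (n ≥ 1).
theorem pv_step_carry (n p : Int) (hn : 1 ≤ n) (h : PySem.Int.mod p n + 1 = n) :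
    PySem.Int.floordiv (p+1) n = PySem.Int.floordiv p n + 1 ∧ PySem.Int.mod (p+1) n = 0 := by
  simp only [PySem.Int.floordiv_eq_ediv_of_pos (show (0:Int) < n by omega),
             PySem.Int.mod_eq_emod_of_pos (show (0:Int) < n by omega)] at h ⊢
  have h1 := Int.emod_add_mul_ediv p n
  have key : (p+1) = n * (p/n + 1) := by linarith
  constructor
  · rw [key, Int.mul_ediv_cancel_left _ (by omega : n ≠ 0)]
  · rw [key, Int.mul_emod_right]

theorem pv_step_plain (n p : Int) (hn : 1 ≤ n) (h : PySem.Int.mod p n + 1 ≠ n) :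
    PySem.Int.floordiv (p+1) n = PySem.Int.floordiv p n ∧ PySem.Int.mod (p+1) n = PySem.Int.mod p n + 1 := by
  simp only [PySem.Int.floordiv_eq_ediv_of_pos (show (0:Int) < n by omega),
             PySem.Int.mod_eq_emod_of_pos (show (0:Int) < n by omega)] at h ⊢
  have h1 := Int.emod_add_mul_ediv p n
  have h2 : 0 ≤ p % n := Int.emod_nonneg p (by omega)
  have h3 : p % n < n := Int.emod_lt_of_pos p (by omega)
  have key : (p+1) = (p % n + 1) + n * (p / n) := by linarith
  constructor
  · rw [key, Int.add_mul_ediv_left _ _ (by omega : n ≠ 0),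
        Int.ediv_eq_zero_of_lt (by omega) (by omega)]; ring
  · rw [key, Int.add_mul_emod_self_left, Int.emod_eq_of_lt (by omega) (by omega)]

theorem pv_mod_bounds (n p : Int) (hn : 1 ≤ n) :
    0 ≤ PySem.Int.mod p n ∧ PySem.Int.mod p n < n := by
  rw [PySem.Int.mod_eq_emod_of_pos (by omega)]
  exact ⟨Int.emod_nonneg p (by omega), Int.emod_lt_of_pos p (by omega)⟩

theorem pvWhile1_spec (n l : Int) (len : Nat) (hn : 1 ≤ n) :
    ∀ (f k : Nat), k < len → len - k < f →
    ∃ i' j' k',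
      pvWhile1 n (PySem.Int.floordiv (l + k) n) (PySem.Int.mod (l + k) n) k (pvGood n l len k) f
        = (i', j', k', pvGood n l len k') ∧
      k ≤ k' ∧ k' ≤ len ∧
      ( (k' < len ∧ i' = PySem.Int.floordiv (l + k') n ∧ j' = PySem.Int.mod (l + k') n ∧ ¬ j' ≤ i')
      ∨ (∃ m : Nat, k' = m + 1 ∧ k' = len ∧ i' = PySem.Int.floordiv (l + m) n ∧
          j' = PySem.Int.mod (l + m) n + 1 ∧ PySem.Int.mod (l + m) n ≤ PySem.Int.floordiv (l + m) n) ) ∧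
      (PySem.Int.mod (l + k) n ≤ PySem.Int.floordiv (l + k) n → k < k') := by
  intro f
  induction f with
  | zero => intro k hk hf; omega
  | succ f ih =>
    intro k hk hf
    by_cases hc : PySem.Int.mod (l + k) n ≤ PySem.Int.floordiv (l + k) n
    · have hgl : ((pvGood n l len k).set k (PySem.Int.floordiv (l + k) n + 1)).length = len := by
        rw [List.length_set, pvGood_length n l len k hk.le]
      have hset : (pvGood n l len k).set k (PySem.Int.floordiv (l + k) n + 1)
          = pvGood n l len (k + 1) := by
        have hv : PySem.Int.floordiv (l + k) n + 1 = pvF n (l + k) := by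
          unfold pvF; rw [max_eq_left hc]
        rw [hv]; exact pvGood_set n l len k hk
      by_cases hbr : k + 1 = len
      · refine ⟨PySem.Int.floordiv (l + k) n, PySem.Int.mod (l + k) n + 1, k + 1, ?_, by omega,
          by omega, Or.inr ⟨k, rfl, hbr, rfl, rfl, hc⟩, by omega⟩
        simp only [pvWhile1]
        rw [if_pos hc, hgl, if_pos hbr, hset]
      · have hkl : k + 1 < len := by omega
        have hcast : l + ((k + 1 : Nat) : Int) = (l + k) + 1 := by push_cast; ring
        obtain ⟨i', j', k', heq, h1, h2, h3, h4⟩ := ih (k + 1) hkl (by omega)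
        refine ⟨i', j', k', ?_, by omega, h2, h3, by omega⟩
        simp only [pvWhile1]
        rw [if_pos hc, hgl, if_neg hbr]
        by_cases hj : PySem.Int.mod (l + k) n + 1 = n
        · have hstep := pv_step_carry n (l + k) hn hj
          rw [if_pos hj, hset,
            show PySem.Int.floordiv (l + k) n + 1 = PySem.Int.floordiv (l + ((k + 1 : Nat) : Int)) n by
              rw [hcast, hstep.1],
            show (0 : Int) = PySem.Int.mod (l + ((k + 1 : Nat) : Int)) n by rw [hcast, hstep.2]]
          exact heq
        · have hstep := pv_step_plain n (l + k) hn hj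
          rw [if_neg hj, hset,
            show PySem.Int.floordiv (l + k) n = PySem.Int.floordiv (l + ((k + 1 : Nat) : Int)) n by
              rw [hcast, hstep.1],
            show PySem.Int.mod (l + k) n + 1 = PySem.Int.mod (l + ((k + 1 : Nat) : Int)) n by
              rw [hcast, hstep.2]]
          exact heq
    · refine ⟨_, _, k, ?_, le_refl _, hk.le, Or.inl ⟨hk, rfl, rfl, hc⟩, fun h => absurd h hc⟩
      simp only [pvWhile1]
      rw [if_neg hc]

theorem pvWhile2_spec (n l : Int) (len : Nat) (hn : 1 ≤ n) :
    ∀ (f k : Nat), k < len → len - k < f →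
    ∃ i' j' k',
      pvWhile2 n (PySem.Int.floordiv (l + k) n) (PySem.Int.mod (l + k) n) k (pvGood n l len k) f
        = (i', j', k', pvGood n l len k') ∧
      k ≤ k' ∧ k' ≤ len ∧
      ( (k' < len ∧ i' = PySem.Int.floordiv (l + k') n ∧ j' = PySem.Int.mod (l + k') n ∧
          ¬ (i' < j' ∧ j' < n))
      ∨ (∃ m : Nat, k' = m + 1 ∧ k' = len) ) ∧
      (PySem.Int.floordiv (l + k) n < PySem.Int.mod (l + k) n → k < k') := by
  intro f
  induction f with
  | zero => intro k hk hf; omega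
  | succ f ih =>
    intro k hk hf
    have hb := pv_mod_bounds n (l + k) hn
    by_cases hc : PySem.Int.floordiv (l + k) n < PySem.Int.mod (l + k) n
    · have hcc : PySem.Int.floordiv (l + k) n < PySem.Int.mod (l + k) n ∧ PySem.Int.mod (l + k) n < n :=
        ⟨hc, hb.2⟩
      have hgl : ((pvGood n l len k).set k (PySem.Int.mod (l + k) n + 1)).length = len := by
        rw [List.length_set, pvGood_length n l len k hk.le]
      have hset : (pvGood n l len k).set k (PySem.Int.mod (l + k) n + 1)
          = pvGood n l len (k + 1) := by
        have hv : PySem.Int.mod (l + k) n + 1 = pvF n (l + k) := by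
          unfold pvF; rw [max_eq_right hc.le]
        rw [hv]; exact pvGood_set n l len k hk
      by_cases hbr : k + 1 = len
      · refine ⟨PySem.Int.floordiv (l + k) n, PySem.Int.mod (l + k) n + 1, k + 1, ?_, by omega,
          by omega, Or.inr ⟨k, rfl, hbr⟩, by omega⟩
        simp only [pvWhile2]
        rw [if_pos hcc, hgl, if_pos hbr, hset]
      · have hkl : k + 1 < len := by omega
        have hcast : l + ((k + 1 : Nat) : Int) = (l + k) + 1 := by push_cast; ring
        obtain ⟨i', j', k', heq, h1, h2, h3, h4⟩ := ih (k + 1) hkl (by omega)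
        refine ⟨i', j', k', ?_, by omega, h2, h3, by omega⟩
        simp only [pvWhile2]
        rw [if_pos hcc, hgl, if_neg hbr]
        by_cases hj : PySem.Int.mod (l + k) n + 1 = n
        · have hstep := pv_step_carry n (l + k) hn hj
          rw [if_pos hj, hset,
            show PySem.Int.floordiv (l + k) n + 1 = PySem.Int.floordiv (l + ((k + 1 : Nat) : Int)) n by
              rw [hcast, hstep.1],
            show (0 : Int) = PySem.Int.mod (l + ((k + 1 : Nat) : Int)) n by rw [hcast, hstep.2]]
          exact heq
        · have hstep := pv_step_plain n (l + k) hn hj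
          rw [if_neg hj, hset,
            show PySem.Int.floordiv (l + k) n = PySem.Int.floordiv (l + ((k + 1 : Nat) : Int)) n by
              rw [hcast, hstep.1],
            show PySem.Int.mod (l + k) n + 1 = PySem.Int.mod (l + ((k + 1 : Nat) : Int)) n by
              rw [hcast, hstep.2]]
          exact heq
    · have hnc : ¬ (PySem.Int.floordiv (l + k) n < PySem.Int.mod (l + k) n ∧
          PySem.Int.mod (l + k) n < n) := fun h => hc h.1
      refine ⟨_, _, k, ?_, le_refl _, hk.le, Or.inl ⟨hk, rfl, rfl, hnc⟩, fun h => absurd h hc⟩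
      simp only [pvWhile2]
      rw [if_neg hnc]

theorem pvOuter_spec (n l : Int) (len : Nat) (hn : 1 ≤ n)
    (hsafe : ∀ m : Nat, m + 1 = len →
      ¬(PySem.Int.mod (l + m) n = PySem.Int.floordiv (l + m) n ∧ PySem.Int.mod (l + m) n + 1 < n)) :
    ∀ (f : Nat) (i j : Int) (k : Nat), len - k < f →
    (k = len ∨ (k < len ∧ i = PySem.Int.floordiv (l + k) n ∧ j = PySem.Int.mod (l + k) n)) →
    pvOuter n i j k (pvGood n l len k) f = pvGood n l len len := by
  intro f
  induction f with
  | zero => intro i j k hf hinv; rcases hinv with h | h <;> omega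
  | succ f ih =>
    intro i j k hf hinv
    rcases hinv with hkl | ⟨hk, hi, hj⟩
    · subst hkl
      simp only [pvOuter]
      rw [if_neg (by rw [pvGood_length n l k k le_rfl]; omega)]
    · subst hi; subst hj
      simp only [pvOuter]
      rw [if_pos (by rw [pvGood_length n l len k hk.le]; exact hk)]
      obtain ⟨i1, j1, k1, heq1, hle1, hlen1, hpost1, hprog1⟩ :=
        pvWhile1_spec n l len hn ((pvGood n l len k).length + 1) k hk
          (by rw [pvGood_length n l len k hk.le]; omega)
      rw [heq1]
      rcases hpost1 with ⟨hk1, hi1, hj1, hnc1⟩ | ⟨m, hm1, hm2, hi1, hj1, hmle⟩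
      · subst hi1; subst hj1
        obtain ⟨i2, j2, k2, heq2, hle2, hlen2, hpost2, hprog2⟩ :=
          pvWhile2_spec n l len hn ((pvGood n l len k1).length + 1) k1 hk1
            (by rw [pvGood_length n l len k1 hk1.le]; omega)
        rw [heq2]
        have hprogress : k < k2 := by
          rcases Nat.lt_or_ge k k1 with h | h
          · omega
          · have hkk : k1 = k := by omega
            have := hprog2 (by rw [hkk]; omega)
            omega
        change pvOuter n i2 j2 k2 (pvGood n l len k2) f = pvGood n l len len
        apply ih
        · omega
        · rcases hpost2 with ⟨hk2, hi2, hj2, _⟩ | ⟨m, hm1, hm2⟩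
          · exact Or.inr ⟨hk2, hi2, hj2⟩
          · exact Or.inl hm2
      · -- pvWhile1 broke at k1 = len; under hsafe the second while's condition is false
        subst hi1; subst hj1
        have hnc2 : ¬ (PySem.Int.floordiv (l + m) n < PySem.Int.mod (l + m) n + 1 ∧
            PySem.Int.mod (l + m) n + 1 < n) := by
          intro ⟨h1, h2⟩
          exact hsafe m (by omega) ⟨by omega, h2⟩
        simp only [pvWhile2]
        rw [if_neg hnc2]
        change pvOuter n (PySem.Int.floordiv (l + m) n) (PySem.Int.mod (l + m) n + 1) k1
            (pvGood n l len k1) f = pvGood n l len len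
        apply ih
        · omega
        · exact Or.inl hm2

-- ===== VERDICT (by name: the statement is the Claim_ definition above) =====
theorem solution_spec : Claim_equal_solution := by
  intro n l r _ hpre
  rcases hpre with ⟨hn, hno⟩ | ⟨hn0, hrl⟩
  case inr =>
    unfold Spec_solution solution solution_alt
    have h0 : (r - l + 1).toNat = 0 := by omega
    rw [h0, PySem.List.pyRange_one_eq_nil (by omega)]
    simp [pvOuter]
  have hsafe : ∀ m : Nat, m + 1 = (r - l + 1).toNat →
      ¬(PySem.Int.mod (l + m) n = PySem.Int.floordiv (l + m) n ∧
        PySem.Int.mod (l + m) n + 1 < n) := by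
    intro m hm ⟨he, hlt⟩
    have hr : l + (m : Int) = r := by omega
    rw [hr] at he hlt
    exact hno ⟨by omega, he, hlt⟩
  have hrep : List.replicate (r - l + 1).toNat (0 : Int) = pvGood n l (r - l + 1).toNat 0 := by
    simp [pvGood]
  have hmain := pvOuter_spec n l (r - l + 1).toNat hn hsafe
      ((List.replicate (r - l + 1).toNat (0 : Int)).length + 1)
      (PySem.Int.floordiv l n) (PySem.Int.mod l n) 0
      (by simp)
      (by
        rcases Nat.eq_zero_or_pos (r - l + 1).toNat with h0 | h0
        · exact Or.inl h0.symm
        · exact Or.inr ⟨h0, by simp, by simp⟩)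
  unfold Spec_solution solution solution_alt
  rw [hrep] at hmain
  have hlen : (r + 1 - l).toNat = (r - l + 1).toNat := by omega
  rw [hrep, hmain, PySem.List.pyRange_one, hlen, List.map_map]
  simp only [pvGood, Nat.sub_self, List.replicate_zero, List.append_nil]
  rfl

theorem solution_raises : Claim_raises_solution := by
  unfold Claim_raises_solution
  refine ⟨?_, by decide⟩
  intro n left right _ hr hp
  rcases hr with ⟨hn1, hlr, _, he, hlt⟩ | ⟨hz, hrl⟩
  · rcases hp with ⟨_, hno⟩ | ⟨_, hrl⟩
    · exact hno ⟨hlr, he, hlt⟩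
    · exact absurd hlr (not_le.mpr hrl)
  · rcases hp with ⟨hn1, _⟩ | ⟨hnz, _⟩
    · omega
    · exact hnz hz

-- Self-check: the raise witness (2, 0, 0) indeed lies outside Pre_solution.
theorem pvRaiseWitnessOutsidePre_ok : ¬ Pre_solution 2 0 0 :=
  solution_raises.1 2 0 0 (by decide) (by decide)
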